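-- pv_equiv track=rewrite | github.com/Natkuma01/CodePath_TIP103 | Unit2/Session1/Version1.py | can_make_balanced
-- ===== SOURCE A (Python) =====
-- def can_make_balanced(code):
--     freq = {}
--     for num in code:
--         if num in freq:
--             freq[num] += 1
--         else:
--             freq[num] = 1
--     biggest = max(freq.values())
--     count = 0
--     for num in freq.values():
--         if num == biggest - 1:
--             count += 1
--     return count == len(freq) - 1
-- ===== SOURCE B (Python) =====
-- def can_make_balanced(code):
--     freq = {}
--     for num in code:
--         freq[num] = freq.get(num, 0) + 1
--     biggest = max(freq.values())
--     return all(v == biggest - 1 for v in sorted(freq.values())[:-1])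
-- ===== Notes on version B (the rewrite author's own statement) =====
-- stated objective: alternative
-- what changed: B sorts the frequency values and checks that every value except the single largest equals biggest-1, instead of A's count-the-matches-and-compare-to-len(freq)-1 scan.
import Mathlib
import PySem

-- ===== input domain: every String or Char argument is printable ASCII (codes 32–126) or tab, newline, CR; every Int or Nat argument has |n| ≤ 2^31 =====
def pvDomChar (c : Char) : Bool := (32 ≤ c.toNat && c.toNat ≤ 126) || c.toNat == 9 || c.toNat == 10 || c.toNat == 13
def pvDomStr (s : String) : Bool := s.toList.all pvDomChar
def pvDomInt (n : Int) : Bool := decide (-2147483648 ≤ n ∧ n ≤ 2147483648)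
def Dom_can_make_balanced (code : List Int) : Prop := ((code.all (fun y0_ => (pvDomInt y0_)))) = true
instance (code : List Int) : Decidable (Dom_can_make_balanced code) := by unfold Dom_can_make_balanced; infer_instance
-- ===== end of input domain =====

-- B checks the frequency multiset by sorting: every value except the single largest must equal biggest-1,
-- instead of A's count-the-matches-and-compare-to-len(freq)-1 scan.  Objective: alternative (same result, different algorithm).

-- ===== PORT A =====
def can_make_balanced (code : List Int) : Bool :=
  let freq := code.foldl (fun d num =>
    if d.contains num then d.modify num 0 (fun v => v + 1) else d.insert num 1)
    (PySem.Dict.empty : PySem.Dict Int Int)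
  match PySem.List.max? freq.values (fun v => v) with
  | none => false   -- unreachable under Pre_: max([]) raises ValueError
  | some biggest =>
    let count := freq.values.foldl (fun c num => if num == biggest - 1 then c + 1 else c) (0 : Int)
    decide (count = (freq.size : Int) - 1)

-- ===== PORT B =====
def can_make_balanced_alt (code : List Int) : Bool :=
  let freq := code.foldl (fun d num => d.insert num (d.getD num 0 + 1)) (PySem.Dict.empty : PySem.Dict Int Int)
  match PySem.List.max? freq.values (fun v => v) with
  | none => false   -- unreachable under Pre_: max([]) raises ValueError
  | some biggest =>
    (PySem.List.slice (PySem.List.sorted freq.values (fun v => v) false) none (some (-1))).all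
      (fun v => v == biggest - 1)

-- ===== PRECONDITION & SPEC =====
-- Pre_ excludes only the empty list, on which A's max() raises ValueError (B raises there too).
def Pre_can_make_balanced (code : List Int) : Prop := code ≠ []
instance (code : List Int) : Decidable (Pre_can_make_balanced code) := by
  unfold Pre_can_make_balanced; infer_instance
def pvWitness_can_make_balanced : List Int := ([1, 2, 2])

def Spec_can_make_balanced (code : List Int) (out : Bool) : Prop := out = can_make_balanced_alt code
instance (code : List Int) (out : Bool) : Decidable (Spec_can_make_balanced code out) := by
  unfold Spec_can_make_balanced; infer_instance

-- ===== CLAIM (what is proved, stated in full; the proofs are below) =====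
def Claim_equal_can_make_balanced : Prop := ∀ (code : List Int), Dom_can_make_balanced code → Pre_can_make_balanced code → Spec_can_make_balanced code (can_make_balanced code)

-- ===== LEMMAS AND PROOFS =====

-- A's dict-building loop builds Counter(code), step by step.
theorem buildA_eq_counter (code : List Int) :
    code.foldl (fun d num =>
      if d.contains num then d.modify num 0 (fun v => v + 1) else d.insert num 1)
      PySem.Dict.empty = PySem.Dict.counter code := by
  rw [PySem.Dict.counter_eq_foldl]
  have hstep : (fun (d : PySem.Dict Int Int) num =>
      if d.contains num then d.modify num 0 (fun v => v + 1) else d.insert num 1)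
      = fun d num => d.modify num 0 (fun v => v + 1) := by
    funext d num
    by_cases h : d.contains num = true
    · simp [h]
    · simp only [Bool.not_eq_true] at h
      simp [h, PySem.Dict.modify, PySem.Dict.getD_of_not_contains _ _ h]
  rw [hstep]

-- A's counting loop over a list is List.count, cast to Int.
theorem foldl_count (vs : List Int) (x : Int) (c : Int) :
    vs.foldl (fun c num => if num == x then c + 1 else c) c = c + (vs.count x : Int) := by
  induction vs generalizing c with
  | nil => simp
  | cons v t ih =>
    simp only [List.foldl_cons, List.count_cons, ih]
    by_cases h : v = x
    · simp [h]; ring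
    · simp [h]

-- the last element of a (non-reverse) sorted nonempty list is the value max? returns
theorem getLast_sorted_eq_max (vs s : List Int) (b : Int)
    (hs : PySem.List.sorted vs (fun v => v) false = s)
    (hmax : PySem.List.max? vs (fun v => v) = some b)
    (hne : s ≠ []) :
    s.getLast hne = b := by
  have hperm : s.Perm vs := hs ▸ PySem.List.sorted_perm vs (fun v => v) false
  have hlastmem : s.getLast hne ∈ vs := hperm.mem_iff.mp (List.getLast_mem hne)
  have h1 : s.getLast hne ≤ b := PySem.List.max?_isMax hmax _ hlastmem
  have hbmem : b ∈ s := hperm.mem_iff.mpr (PySem.List.max?_mem hmax)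
  have hpw : s.Pairwise (fun a b => a ≤ b) := hs ▸ PySem.List.sorted_pairwise vs (fun v => v)
  have hsplit : s.dropLast ++ [s.getLast hne] = s := List.dropLast_append_getLast hne
  have h2 : b ≤ s.getLast hne := by
    rw [← hsplit] at hbmem hpw
    rcases List.mem_append.mp hbmem with h | h
    · exact (List.pairwise_append.mp hpw).2.2 b h _ (by simp)
    · simp at h; omega
  omega

-- A's check ⟷ B's check, on any nonempty value list with maximum b
theorem count_iff_all (vs : List Int) (b : Int)
    (hmax : PySem.List.max? vs (fun v => v) = some b) :
    (decide ((vs.count (b - 1) : Int) = (vs.length : Int) - 1)) =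
    (PySem.List.sorted vs (fun v => v) false).dropLast.all (fun v => v == b - 1) := by
  have hvs : vs ≠ [] := by
    intro h; subst h; simp [PySem.List.max?] at hmax
  set s := PySem.List.sorted vs (fun v => v) false with hs
  have hperm : s.Perm vs := PySem.List.sorted_perm vs (fun v => v) false
  have hne : s ≠ [] := by
    intro h
    apply hvs
    have := hperm.length_eq
    rw [h] at this
    exact List.eq_nil_of_length_eq_zero this.symm
  have hlast : s.getLast hne = b := getLast_sorted_eq_max vs s b hs.symm hmax hne
  have hsplit : s.dropLast ++ [b] = s := hlast ▸ List.dropLast_append_getLast hne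
  have hcount : vs.count (b - 1) = s.dropLast.count (b - 1) := by
    have hpc : s.count (b - 1) = vs.count (b - 1) := hperm.count_eq _
    have hc2 : List.count (b - 1) s = List.count (b - 1) s.dropLast := by
      conv_lhs => rw [← hsplit]
      rw [List.count_append, List.count_singleton]
      have hb : (b == b - 1) = false := by simp; omega
      rw [hb]
      simp
    rw [← hpc, hc2]
  have hlen : vs.length = s.dropLast.length + 1 := by
    rw [← hperm.length_eq, ← hsplit]; simp
  rcases Bool.eq_false_or_eq_true (s.dropLast.all (fun v => v == b - 1)) with h | h
  case _ =>
    rw [h]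
    simp only [List.all_eq_true, beq_iff_eq] at h
    have hcl : s.dropLast.count (b - 1) = s.dropLast.length :=
      List.count_eq_length.mpr (fun x hx => (h x hx).symm)
    apply decide_eq_true
    omega
  case _ =>
    rw [h]
    apply decide_eq_false
    intro habs
    have hcl : s.dropLast.count (b - 1) = s.dropLast.length := by omega
    have hall : s.dropLast.all (fun v => v == b - 1) = true := by
      simp only [List.all_eq_true, beq_iff_eq]
      intro x hx
      exact (List.count_eq_length.mp hcl x hx).symm
    rw [h] at hall
    exact Bool.false_ne_true hall

-- ===== VERDICT (by name: the statement is the Claim_ definition above) =====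
theorem can_make_balanced_spec : Claim_equal_can_make_balanced := by
  intro code _ hpre
  unfold Spec_can_make_balanced can_make_balanced can_make_balanced_alt
  simp only [buildA_eq_counter, PySem.Dict.foldl_insert_getD_add_one_eq_counter]
  set vs := (PySem.Dict.counter code).values with hvs
  cases hmax : PySem.List.max? vs (fun v => v) with
  | none => rfl
  | some b =>
    simp only
    rw [foldl_count, PySem.List.slice_to_neg_one, ← count_iff_all vs b hmax]
    have hsize : (PySem.Dict.counter code).size = vs.length := by
      simp [PySem.Dict.size, PySem.Dict.values, hvs]
    rw [hsize]
    norm_num
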